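-- pv_equiv track=rewrite | github.com/map-lo/DrumEngine01 | generators/generate_circles.py | detect_instrument_type_from_tokens
-- ===== SOURCE A (Python) =====
-- def detect_instrument_type_from_tokens(tokens):
--     token_set = {token.upper() for token in tokens}
--
--     if {"HIHAT", "HIHATS", "HAT", "HATS"} & token_set:
--         return "hihat"
--
--     if {"CRASH", "CRASHES"} & token_set:
--         return "crash"
--
--     if {"RIDE", "RIDES"} & token_set:
--         return "ride"
--
--     if {"CYMBAL", "CYMBALS"} & token_set:
--         return "cymbal"
--
--     if {"TOM", "TOMS"} & token_set:
--         return "tom"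
--
--     if {"SNARE", "SNARES"} & token_set:
--         return "snare"
--
--     if {"KICK", "KICKS"} & token_set:
--         return "kick"
--
--     if {"PERCUSSION", "PERC", "CONGA", "SHAKER", "TAMBO", "TAMBOURINE"} & token_set:
--         return "percussion"
--
--     return None
-- ===== SOURCE B (Python) =====
-- _GROUPS = [
--     (("HIHAT", "HIHATS", "HAT", "HATS"), "hihat"),
--     (("CRASH", "CRASHES"), "crash"),
--     (("RIDE", "RIDES"), "ride"),
--     (("CYMBAL", "CYMBALS"), "cymbal"),
--     (("TOM", "TOMS"), "tom"),
--     (("SNARE", "SNARES"), "snare"),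
--     (("KICK", "KICKS"), "kick"),
--     (("PERCUSSION", "PERC", "CONGA", "SHAKER", "TAMBO", "TAMBOURINE"), "percussion"),
-- ]
--
-- _RANK_OF = {}
-- for _rank, (_keywords, _itype) in enumerate(_GROUPS):
--     for _kw in _keywords:
--         _RANK_OF[_kw] = (_rank, _itype)
--
--
-- def detect_instrument_type_from_tokens(tokens):
--     best = None
--     for token in tokens:
--         hit = _RANK_OF.get(token.upper())
--         if hit is not None and (best is None or hit[0] < best[0]):
--             best = hit
--     return None if best is None else best[1]
-- ===== Notes on version B (the rewrite author's own statement) =====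
-- stated objective: simpler
-- what changed: Replaced the eight sequential set-intersection tests over an uppercased token set by a single static keyword-to-(priority rank, type) table and one fold over the tokens keeping the best (lowest) rank.
import Mathlib
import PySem

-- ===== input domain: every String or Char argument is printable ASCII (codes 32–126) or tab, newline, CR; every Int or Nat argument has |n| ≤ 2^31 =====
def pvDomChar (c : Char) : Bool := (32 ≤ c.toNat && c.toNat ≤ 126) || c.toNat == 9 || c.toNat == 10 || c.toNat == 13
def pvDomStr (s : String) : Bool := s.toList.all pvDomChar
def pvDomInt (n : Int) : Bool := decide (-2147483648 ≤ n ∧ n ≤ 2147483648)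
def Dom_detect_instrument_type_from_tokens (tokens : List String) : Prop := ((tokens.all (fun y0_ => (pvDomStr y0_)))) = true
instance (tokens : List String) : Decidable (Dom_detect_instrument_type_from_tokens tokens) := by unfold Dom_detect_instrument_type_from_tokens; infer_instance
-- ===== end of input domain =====

-- B replaces A's eight set-intersection passes by one static keyword→(rank, type) table and a
-- single best-rank fold over the tokens (objective: simpler/alternative, same result).

-- ===== PORT A =====
def detect_instrument_type_from_tokens (tokens : List String) : Option String :=
  let token_set : PySem.Set String := PySem.Set.ofList (tokens.map PySem.Str.upper)
  if PySem.Set.inter (PySem.Set.ofList ["HIHAT", "HIHATS", "HAT", "HATS"]) token_set ≠ [] then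
    some "hihat"
  else if PySem.Set.inter (PySem.Set.ofList ["CRASH", "CRASHES"]) token_set ≠ [] then
    some "crash"
  else if PySem.Set.inter (PySem.Set.ofList ["RIDE", "RIDES"]) token_set ≠ [] then
    some "ride"
  else if PySem.Set.inter (PySem.Set.ofList ["CYMBAL", "CYMBALS"]) token_set ≠ [] then
    some "cymbal"
  else if PySem.Set.inter (PySem.Set.ofList ["TOM", "TOMS"]) token_set ≠ [] then
    some "tom"
  else if PySem.Set.inter (PySem.Set.ofList ["SNARE", "SNARES"]) token_set ≠ [] then
    some "snare"
  else if PySem.Set.inter (PySem.Set.ofList ["KICK", "KICKS"]) token_set ≠ [] then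
    some "kick"
  else if PySem.Set.inter (PySem.Set.ofList ["PERCUSSION", "PERC", "CONGA", "SHAKER", "TAMBO", "TAMBOURINE"]) token_set ≠ [] then
    some "percussion"
  else
    none

-- ===== PORT B =====
-- the static keyword table _RANK_OF of Source B (a dict built once from _GROUPS)
def pvRankOf : PySem.Dict String (Nat × String) :=
  PySem.Dict.ofList
    [("HIHAT", (0, "hihat")), ("HIHATS", (0, "hihat")), ("HAT", (0, "hihat")), ("HATS", (0, "hihat")),
     ("CRASH", (1, "crash")), ("CRASHES", (1, "crash")),
     ("RIDE", (2, "ride")), ("RIDES", (2, "ride")),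
     ("CYMBAL", (3, "cymbal")), ("CYMBALS", (3, "cymbal")),
     ("TOM", (4, "tom")), ("TOMS", (4, "tom")),
     ("SNARE", (5, "snare")), ("SNARES", (5, "snare")),
     ("KICK", (6, "kick")), ("KICKS", (6, "kick")),
     ("PERCUSSION", (7, "percussion")), ("PERC", (7, "percussion")), ("CONGA", (7, "percussion")),
     ("SHAKER", (7, "percussion")), ("TAMBO", (7, "percussion")), ("TAMBOURINE", (7, "percussion"))]

def pvStep (best : Option (Nat × String)) (token : String) : Option (Nat × String) :=
  match PySem.Dict.get? pvRankOf (PySem.Str.upper token) with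
  | none => best
  | some hit =>
    match best with
    | none => some hit
    | some b => if hit.1 < b.1 then some hit else best

def detect_instrument_type_from_tokens_alt (tokens : List String) : Option String :=
  match tokens.foldl pvStep none with
  | none => none
  | some b => some b.2

-- ===== PRECONDITION & SPEC =====
def Spec_detect_instrument_type_from_tokens (tokens : List String) (out : Option String) : Prop := out = detect_instrument_type_from_tokens_alt tokens
instance (tokens : List String) (out : Option String) : Decidable (Spec_detect_instrument_type_from_tokens tokens out) := by unfold Spec_detect_instrument_type_from_tokens; infer_instance

-- ===== CLAIM (what is proved, stated in full; the proofs are below) =====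
def Claim_equal_detect_instrument_type_from_tokens : Prop := ∀ (tokens : List String), Dom_detect_instrument_type_from_tokens tokens → Spec_detect_instrument_type_from_tokens tokens (detect_instrument_type_from_tokens tokens)

-- ===== LEMMAS AND PROOFS =====

-- left-biased minimum by rank
def pvOmin (a b : Option (Nat × String)) : Option (Nat × String) :=
  match a, b with
  | none, b => b
  | a, none => a
  | some p, some q => if q.1 < p.1 then some q else some p

-- A's if-chain, with the rank attached, expressed through per-group any-scans
def pvHit (keys : List String) (tokens : List String) : Bool :=
  tokens.any (fun t => decide (PySem.Str.upper t ∈ keys))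

def pvChain (b0 b1 b2 b3 b4 b5 b6 b7 : Bool) : Option (Nat × String) :=
  if b0 then some (0, "hihat")
  else if b1 then some (1, "crash")
  else if b2 then some (2, "ride")
  else if b3 then some (3, "cymbal")
  else if b4 then some (4, "tom")
  else if b5 then some (5, "snare")
  else if b6 then some (6, "kick")
  else if b7 then some (7, "percussion")
  else none

def pvK0 : List String := ["HIHAT", "HIHATS", "HAT", "HATS"]
def pvK1 : List String := ["CRASH", "CRASHES"]
def pvK2 : List String := ["RIDE", "RIDES"]
def pvK3 : List String := ["CYMBAL", "CYMBALS"]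
def pvK4 : List String := ["TOM", "TOMS"]
def pvK5 : List String := ["SNARE", "SNARES"]
def pvK6 : List String := ["KICK", "KICKS"]
def pvK7 : List String := ["PERCUSSION", "PERC", "CONGA", "SHAKER", "TAMBO", "TAMBOURINE"]

def pvAChain (tokens : List String) : Option (Nat × String) :=
  pvChain (pvHit pvK0 tokens) (pvHit pvK1 tokens) (pvHit pvK2 tokens) (pvHit pvK3 tokens)
          (pvHit pvK4 tokens) (pvHit pvK5 tokens) (pvHit pvK6 tokens) (pvHit pvK7 tokens)

lemma pv_inter_ne_iff (keys tokens : List String) :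
    (PySem.Set.inter (PySem.Set.ofList keys) (PySem.Set.ofList (tokens.map PySem.Str.upper)) ≠ []) ↔
      pvHit keys tokens = true := by
  rw [← List.isEmpty_eq_false_iff, List.isEmpty_eq_false_iff_exists_mem]
  unfold pvHit
  simp only [PySem.Set.mem_inter, PySem.Set.mem_ofList, List.mem_map, List.any_eq_true,
    decide_eq_true_eq]
  constructor
  · rintro ⟨x, hk, t, ht, rfl⟩; exact ⟨t, ht, hk⟩
  · rintro ⟨t, ht, hk⟩; exact ⟨PySem.Str.upper t, hk, t, ht, rfl⟩

lemma pv_A_eq_aChain (tokens : List String) :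
    detect_instrument_type_from_tokens tokens = (pvAChain tokens).map Prod.snd := by
  unfold detect_instrument_type_from_tokens pvAChain pvChain pvK0 pvK1 pvK2 pvK3 pvK4 pvK5 pvK6 pvK7
  simp only [pv_inter_ne_iff]
  generalize pvHit ["HIHAT", "HIHATS", "HAT", "HATS"] tokens = c0
  generalize pvHit ["CRASH", "CRASHES"] tokens = c1
  generalize pvHit ["RIDE", "RIDES"] tokens = c2
  generalize pvHit ["CYMBAL", "CYMBALS"] tokens = c3
  generalize pvHit ["TOM", "TOMS"] tokens = c4
  generalize pvHit ["SNARE", "SNARES"] tokens = c5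
  generalize pvHit ["KICK", "KICKS"] tokens = c6
  generalize pvHit ["PERCUSSION", "PERC", "CONGA", "SHAKER", "TAMBO", "TAMBOURINE"] tokens = c7
  revert c0 c1 c2 c3 c4 c5 c6 c7
  decide

-- the table lookup of one uppercased token is exactly the chain of its group memberships
set_option maxHeartbeats 1600000 in
lemma pv_lookup_eq_chain (s : String) :
    PySem.Dict.get? pvRankOf s =
      pvChain (decide (s ∈ pvK0)) (decide (s ∈ pvK1)) (decide (s ∈ pvK2)) (decide (s ∈ pvK3))
              (decide (s ∈ pvK4)) (decide (s ∈ pvK5)) (decide (s ∈ pvK6)) (decide (s ∈ pvK7)) := by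
  rw [show pvRankOf =
      ({ items :=
        [("HIHAT", (0, "hihat")), ("HIHATS", (0, "hihat")), ("HAT", (0, "hihat")), ("HATS", (0, "hihat")),
         ("CRASH", (1, "crash")), ("CRASHES", (1, "crash")),
         ("RIDE", (2, "ride")), ("RIDES", (2, "ride")),
         ("CYMBAL", (3, "cymbal")), ("CYMBALS", (3, "cymbal")),
         ("TOM", (4, "tom")), ("TOMS", (4, "tom")),
         ("SNARE", (5, "snare")), ("SNARES", (5, "snare")),
         ("KICK", (6, "kick")), ("KICKS", (6, "kick")),
         ("PERCUSSION", (7, "percussion")), ("PERC", (7, "percussion")), ("CONGA", (7, "percussion")),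
         ("SHAKER", (7, "percussion")), ("TAMBO", (7, "percussion")), ("TAMBOURINE", (7, "percussion"))]
       } : PySem.Dict String (Nat × String)) from rfl]
  unfold pvChain pvK0 pvK1 pvK2 pvK3 pvK4 pvK5 pvK6 pvK7
  by_cases h : s ∈ ["HIHAT", "HIHATS", "HAT", "HATS", "CRASH", "CRASHES", "RIDE", "RIDES",
      "CYMBAL", "CYMBALS", "TOM", "TOMS", "SNARE", "SNARES", "KICK", "KICKS",
      "PERCUSSION", "PERC", "CONGA", "SHAKER", "TAMBO", "TAMBOURINE"]
  · fin_cases h <;> rfl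
  · simp only [List.mem_cons, List.not_mem_nil, or_false, not_or] at h
    obtain ⟨h1, h2, h3, h4, h5, h6, h7, h8, h9, h10, h11, h12, h13, h14, h15, h16, h17, h18,
      h19, h20, h21, h22⟩ := h
    simp [PySem.Dict.get?, beq_iff_eq, List.mem_cons,
      Ne.symm h1, Ne.symm h2, Ne.symm h3, Ne.symm h4, Ne.symm h5, Ne.symm h6, Ne.symm h7,
      Ne.symm h8, Ne.symm h9, Ne.symm h10, Ne.symm h11, Ne.symm h12, Ne.symm h13, Ne.symm h14,
      Ne.symm h15, Ne.symm h16, Ne.symm h17, Ne.symm h18, Ne.symm h19, Ne.symm h20, Ne.symm h21,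
      Ne.symm h22, h1, h2, h3, h4, h5, h6, h7, h8, h9, h10, h11, h12, h13, h14, h15, h16, h17,
      h18, h19, h20, h21, h22]

-- rank i carries the i-th instrument name
def pvName (i : Nat) : Nat × String :=
  (i, ["hihat", "crash", "ride", "cymbal", "tom", "snare", "kick", "percussion"].getD i "")

-- index of the first true flag, counting from i
def pvFirst : List Bool → Nat → Option Nat
  | [], _ => none
  | true :: _, i => some i
  | false :: bs, i => pvFirst bs (i + 1)

def pvOminN (a b : Option Nat) : Option Nat :=
  match a, b with
  | none, b => b
  | a, none => a
  | some p, some q => if q < p then some q else some p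

lemma pv_chain_eq_first : ∀ (b0 b1 b2 b3 b4 b5 b6 b7 : Bool),
    pvChain b0 b1 b2 b3 b4 b5 b6 b7 = (pvFirst [b0, b1, b2, b3, b4, b5, b6, b7] 0).map pvName := by
  decide

lemma pv_first_ge (bs : List Bool) : ∀ (i k : Nat), pvFirst bs i = some k → i ≤ k := by
  induction bs with
  | nil => intro i k h; simp [pvFirst] at h
  | cons b bs ih =>
    intro i k h
    cases b with
    | true => simp only [pvFirst, Option.some.injEq] at h; omega
    | false =>
      simp only [pvFirst] at h
      have := ih (i + 1) k h
      omega

lemma pv_first_or (ps : List Bool) : ∀ (bs : List Bool) (i : Nat), ps.length = bs.length →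
    pvOminN (pvFirst ps i) (pvFirst bs i) = pvFirst (List.zipWith or ps bs) i := by
  induction ps with
  | nil => intro bs i h; cases bs <;> simp_all [pvFirst, pvOminN]
  | cons p ps ih =>
    intro bs i h
    cases bs with
    | nil => simp at h
    | cons b bs =>
      simp only [List.length_cons, Nat.add_right_cancel_iff] at h
      cases p with
      | true =>
        cases b with
        | true => simp [pvOminN, pvFirst]
        | false =>
          show pvOminN (some i) (pvFirst bs (i + 1)) = some i
          cases hb : pvFirst bs (i + 1) with
          | none => rfl
          | some k =>
            have hk : i + 1 ≤ k := pv_first_ge _ _ _ hb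
            have hk2 : ¬ k < i := by omega
            simp [pvOminN, hk2]
      | false =>
        cases b with
        | true =>
          show pvOminN (pvFirst ps (i + 1)) (some i) = some i
          cases hp : pvFirst ps (i + 1) with
          | none => rfl
          | some k =>
            have hk : i + 1 ≤ k := pv_first_ge _ _ _ hp
            have hk2 : i < k := by omega
            simp [pvOminN, hk2]
        | false =>
          show pvOminN (pvFirst ps (i + 1)) (pvFirst bs (i + 1)) =
            pvFirst (List.zipWith or ps bs) (i + 1)
          exact ih bs (i + 1) h

lemma pv_omin_map (x y : Option Nat) :
    pvOmin (x.map pvName) (y.map pvName) = (pvOminN x y).map pvName := by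
  cases x with
  | none => cases y <;> rfl
  | some a =>
    cases y with
    | none => rfl
    | some b =>
      by_cases h : b < a
      · simp [pvOmin, pvOminN, pvName, h]
      · simp [pvOmin, pvOminN, pvName, h]

-- combining one token's hit with the rest's chain
lemma pv_chain_step (p0 p1 p2 p3 p4 p5 p6 p7 b0 b1 b2 b3 b4 b5 b6 b7 : Bool) :
    pvOmin (pvChain p0 p1 p2 p3 p4 p5 p6 p7) (pvChain b0 b1 b2 b3 b4 b5 b6 b7) =
      pvChain (p0 || b0) (p1 || b1) (p2 || b2) (p3 || b3) (p4 || b4) (p5 || b5) (p6 || b6) (p7 || b7) := by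
  rw [pv_chain_eq_first, pv_chain_eq_first, pv_chain_eq_first, pv_omin_map,
    pv_first_or [p0, p1, p2, p3, p4, p5, p6, p7] [b0, b1, b2, b3, b4, b5, b6, b7] 0 rfl]
  rfl

lemma pv_aChain_cons (t : String) (ts : List String) :
    pvAChain (t :: ts) = pvOmin (PySem.Dict.get? pvRankOf (PySem.Str.upper t)) (pvAChain ts) := by
  rw [pv_lookup_eq_chain]
  unfold pvAChain
  rw [pv_chain_step]
  simp [pvHit]

lemma pv_step_eq_omin (best : Option (Nat × String)) (t : String) :
    pvStep best t = pvOmin best (PySem.Dict.get? pvRankOf (PySem.Str.upper t)) := by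
  unfold pvStep pvOmin
  cases PySem.Dict.get? pvRankOf (PySem.Str.upper t) <;> cases best <;> rfl

lemma pv_omin_assoc (a b c : Option (Nat × String)) :
    pvOmin (pvOmin a b) c = pvOmin a (pvOmin b c) := by
  rcases a with _ | p
  · rfl
  · rcases b with _ | q
    · rcases c with _ | r <;> rfl
    · rcases c with _ | r
      · by_cases h1 : q.1 < p.1 <;> simp [pvOmin, h1]
      · by_cases h1 : q.1 < p.1
        · by_cases h2 : r.1 < q.1
          · have h3 : r.1 < p.1 := by omega
            simp [pvOmin, h1, h2, h3]
          · simp [pvOmin, h1, h2]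
        · by_cases h2 : r.1 < q.1
          · simp [pvOmin, h1, h2]
          · have h3 : ¬ r.1 < p.1 := by omega
            simp [pvOmin, h1, h2, h3]

lemma pv_foldl_eq_omin (tokens : List String) (acc : Option (Nat × String)) :
    tokens.foldl pvStep acc = pvOmin acc (pvAChain tokens) := by
  induction tokens generalizing acc with
  | nil => cases acc <;> rfl
  | cons t ts ih =>
    rw [List.foldl_cons, ih, pv_step_eq_omin, pv_omin_assoc, pv_aChain_cons]

-- ===== VERDICT (by name: the statement is the Claim_ definition above) =====
theorem detect_instrument_type_from_tokens_spec : Claim_equal_detect_instrument_type_from_tokens := by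
  intro tokens _
  unfold Spec_detect_instrument_type_from_tokens detect_instrument_type_from_tokens_alt
  rw [pv_foldl_eq_omin, pv_A_eq_aChain]
  cases pvAChain tokens <;> rfl
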